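-- pv_equiv track=rewrite | github.com/theorem46/Yang-Mills-Mass-Gap | 1-Core Validation/exp_core_validation_37_representation_invariance_v1.py | G9
-- ===== SOURCE A (Python) =====
-- def G9(N):
--     x = []
--     for i in range(N):
--         if i % 3 == 0:
--             x.append(i)
--         elif i % 3 == 1:
--             x.append(i * i)
--         else:
--             x.append(i % 7)
--     return x
-- ===== SOURCE B (Python) =====
-- def G9(N):
--     x = []
--     for base in range(0, N, 3):
--         x.append(base)
--         if base + 1 < N:
--             x.append((base + 1) * (base + 1))
--         if base + 2 < N:
--             x.append((base + 2) % 7)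
--     return x
-- ===== Notes on version B (the rewrite author's own statement) =====
-- stated objective: alternative
-- what changed: B iterates over period-3 blocks with range(0, N, 3) and emits the three known-residue values per block with boundary checks, eliminating A's per-element i%3 branch.
import Mathlib
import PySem

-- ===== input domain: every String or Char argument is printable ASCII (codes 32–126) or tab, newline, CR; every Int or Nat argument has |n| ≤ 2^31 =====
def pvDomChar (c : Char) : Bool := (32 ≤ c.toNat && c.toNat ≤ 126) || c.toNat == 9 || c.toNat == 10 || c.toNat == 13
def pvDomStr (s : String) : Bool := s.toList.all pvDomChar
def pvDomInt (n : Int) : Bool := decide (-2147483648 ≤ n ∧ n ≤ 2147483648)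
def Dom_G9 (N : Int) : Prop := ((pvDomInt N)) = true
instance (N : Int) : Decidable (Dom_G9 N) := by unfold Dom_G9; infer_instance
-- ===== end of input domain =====

-- B replaces the per-index i%3 branch by a loop over period-3 blocks (range(0, N, 3)) that
-- emits the three known-residue values per block with boundary checks; same O(N) cost.

-- ===== PORT A =====
def G9 (N : Int) : List Int :=
  (PySem.List.pyRange 0 N 1).foldl
    (fun x i =>
      if PySem.Int.mod i 3 == 0 then x ++ [i]
      else if PySem.Int.mod i 3 == 1 then x ++ [i * i]
      else x ++ [PySem.Int.mod i 7]) []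

-- ===== PORT B =====
def G9_alt (N : Int) : List Int :=
  (PySem.List.pyRange 0 N 3).foldl
    (fun x base =>
      let x1 := x ++ [base]
      let x2 := if base + 1 < N then x1 ++ [(base + 1) * (base + 1)] else x1
      if base + 2 < N then x2 ++ [PySem.Int.mod (base + 2) 7] else x2) []

-- ===== PRECONDITION & SPEC =====
def Spec_G9 (N : Int) (out : List Int) : Prop := out = G9_alt N
instance (N : Int) (out : List Int) : Decidable (Spec_G9 N out) := by unfold Spec_G9; infer_instance

-- ===== CLAIM (what is proved, stated in full; the proofs are below) =====
def Claim_equal_G9 : Prop := ∀ (N : Int), Dom_G9 N → Spec_G9 N (G9 N)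

-- ===== LEMMAS AND PROOFS =====

/-- the per-element value A computes -/
def g9g (i : Int) : Int :=
  if PySem.Int.mod i 3 == 0 then i
  else if PySem.Int.mod i 3 == 1 then i * i
  else PySem.Int.mod i 7

/-- the per-block chunk B appends -/
def g9h (N base : Int) : List Int :=
  [base] ++ (if base + 1 < N then [(base + 1) * (base + 1)] else [])
        ++ (if base + 2 < N then [PySem.Int.mod (base + 2) 7] else [])

theorem g9_foldA (l : List Int) (acc : List Int) :
    l.foldl (fun x i =>
      if PySem.Int.mod i 3 == 0 then x ++ [i]
      else if PySem.Int.mod i 3 == 1 then x ++ [i * i]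
      else x ++ [PySem.Int.mod i 7]) acc = acc ++ l.map g9g := by
  have : (fun (x : List Int) (i : Int) =>
      if PySem.Int.mod i 3 == 0 then x ++ [i]
      else if PySem.Int.mod i 3 == 1 then x ++ [i * i]
      else x ++ [PySem.Int.mod i 7]) = fun x i => x ++ [g9g i] := by
    funext x i
    unfold g9g; split_ifs <;> rfl
  rw [this, PySem.List.foldl_append_singleton_eq_map]

theorem g9_foldB (N : Int) (l : List Int) (acc : List Int) :
    l.foldl (fun x base =>
      let x1 := x ++ [base]
      let x2 := if base + 1 < N then x1 ++ [(base + 1) * (base + 1)] else x1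
      if base + 2 < N then x2 ++ [PySem.Int.mod (base + 2) 7] else x2) acc
    = acc ++ l.flatMap (g9h N) := by
  induction l generalizing acc with
  | nil => simp
  | cons b l ih =>
    simp only [List.foldl_cons, ih, List.flatMap_cons]
    unfold g9h
    split_ifs <;> simp
  
theorem pr3_cons (a b : Int) (h : a < b) :
    PySem.List.pyRange a b 3 = a :: PySem.List.pyRange (a + 3) b 3 := by
  rw [PySem.List.pyRange_of_pos a b (by norm_num),
      PySem.List.pyRange_of_pos (a + 3) b (by norm_num)]
  have hn : ((b - a + 3 - 1) / 3).toNat = ((b - (a + 3) + 3 - 1) / 3).toNat + 1 := by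
    have h1 : (b - a + 3 - 1) / 3 = (b - (a + 3) + 3 - 1) / 3 + 1 := by
      have : b - a + 3 - 1 = (b - (a + 3) + 3 - 1) + 1 * 3 := by ring
      rw [this, Int.add_mul_ediv_right _ _ (by norm_num)]
    have h2 : 0 ≤ (b - (a + 3) + 3 - 1) / 3 := by
      by_cases hb : a + 3 < b
      · exact Int.ediv_nonneg (by omega) (by norm_num)
      · have : (b - (a + 3) + 3 - 1) / 3 = 0 := by
          apply Int.ediv_eq_zero_of_lt <;> omega
        omega
    omega
  by_cases hb : a + 3 < b
  · simp only [if_pos h, if_pos hb, hn, List.range_succ_eq_map, List.map_cons, List.map_map]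
    simp only [Nat.cast_zero, mul_zero, add_zero, List.cons.injEq, true_and]
    congr 1
    funext k
    simp only [Function.comp_apply, Nat.cast_succ]
    ring
  · have hz : ((b - (a + 3) + 3 - 1) / 3).toNat = 0 := by
      have : (b - (a + 3) + 3 - 1) / 3 = 0 := by
        apply Int.ediv_eq_zero_of_lt <;> omega
      omega
    simp only [if_pos h, if_neg hb, hn, hz]
    simp

theorem pr3_nil (a b : Int) (h : b ≤ a) : PySem.List.pyRange a b 3 = [] := by
  rw [PySem.List.pyRange_of_pos a b (by norm_num)]
  simp [if_neg (by omega : ¬ a < b)]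

theorem g9_main (k : Nat) : ∀ (a b : Int), b - a ≤ 3 * k → a % 3 = 0 →
    (PySem.List.pyRange a b 3).flatMap (g9h b) = (PySem.List.pyRange a b 1).map g9g := by
  induction k with
  | zero =>
    intro a b hk _
    rw [pr3_nil a b (by omega), PySem.List.pyRange_one_eq_nil (by omega)]
    simp
  | succ k ih =>
    intro a b hk ha
    by_cases h : a < b
    · rw [pr3_cons a b h, List.flatMap_cons, ih (a + 3) b (by omega) (by omega)]
      have hpos : (0:Int) < 3 := by norm_num
      have hm0 : PySem.Int.mod a 3 = 0 := by
        rw [PySem.Int.mod_eq_emod_of_pos hpos]; exact ha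
      have hm1 : PySem.Int.mod (a + 1) 3 = 1 := by
        rw [PySem.Int.mod_eq_emod_of_pos hpos]; omega
      have hm2 : PySem.Int.mod (a + 2) 3 = 2 := by
        rw [PySem.Int.mod_eq_emod_of_pos hpos]; omega
      have hga : g9g a = a := by simp only [g9g, hm0]; norm_num
      have hga1 : g9g (a + 1) = (a + 1) * (a + 1) := by simp only [g9g, hm1]; norm_num
      have hga2 : g9g (a + 2) = PySem.Int.mod (a + 2) 7 := by simp only [g9g, hm2]; norm_num
      by_cases h3 : a + 3 ≤ b
      · rw [PySem.List.pyRange_one_append a (a + 3) b (by omega) h3,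
            PySem.List.pyRange_one_cons (by omega : a < a + 3),
            PySem.List.pyRange_one_cons (by omega : a + 1 < a + 3)]
        have e2 : a + 1 + 1 = a + 2 := by ring
        rw [e2, PySem.List.pyRange_one_cons (by omega : a + 2 < a + 3)]
        have e3 : a + 2 + 1 = a + 3 := by ring
        rw [e3, PySem.List.pyRange_one_eq_nil (by omega : a + 3 ≤ a + 3)]
        simp only [g9h, if_pos (by omega : a + 1 < b), if_pos (by omega : a + 2 < b)]
        simp [hga, hga1, hga2]
      · rw [PySem.List.pyRange_one_eq_nil (by omega : b ≤ a + 3)]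
        by_cases h1 : a + 1 < b
        · -- b = a + 2
          have hb : b = a + 2 := by omega
          subst hb
          rw [PySem.List.pyRange_one_cons (by omega : a < a + 2),
              PySem.List.pyRange_one_cons (by omega : a + 1 < a + 2)]
          have e2 : a + 1 + 1 = a + 2 := by ring
          rw [e2, PySem.List.pyRange_one_eq_nil (by omega : a + 2 ≤ a + 2)]
          simp only [g9h, if_pos (by omega : a + 1 < a + 2),
            if_neg (by omega : ¬ a + 2 < a + 2)]
          simp [hga, hga1]
        · -- b = a + 1
          have hb : b = a + 1 := by omega
          subst hb
          rw [PySem.List.pyRange_one_cons (by omega : a < a + 1),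
              PySem.List.pyRange_one_eq_nil (by omega : a + 1 ≤ a + 1)]
          simp only [g9h, if_neg (by omega : ¬ a + 1 < a + 1),
            if_neg (by omega : ¬ a + 2 < a + 1)]
          simp [hga]
    · rw [pr3_nil a b (by omega), PySem.List.pyRange_one_eq_nil (by omega)]
      simp

-- ===== VERDICT (by name: the statement is the Claim_ definition above) =====
theorem G9_spec : Claim_equal_G9 := by
  intro N _
  unfold Spec_G9 G9 G9_alt
  rw [g9_foldA, g9_foldB]
  simp only [List.nil_append]
  by_cases h : 0 < N
  · exact (g9_main N.toNat 0 N (by omega) (by norm_num)).symm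
  · rw [pr3_nil 0 N (by omega), PySem.List.pyRange_one_eq_nil (by omega)]
    simp
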